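-- pv_equiv track=rewrite | github.com/Kohei-Oyama/Kadai | kadai_1.py | cal_4times
-- ===== SOURCE A (Python) =====
-- def cal_4times(n):
--     #4の倍数の個数計算
--     c = 0
--     for i in range(1,n-1):
--         k = i*(i+1)*(i+2)
--         if k % 4 == 0:
--             c += 1
--     else:
--         return c
-- ===== SOURCE B (Python) =====
-- def cal_4times(n):
--     # Closed form: i*(i+1)*(i+2) is divisible by 4 for all i in [1, n-2]
--     # except those with i % 4 == 1; there are ceil(m/4) of the latter in [1, m].
--     m = n - 2
--     if m <= 0:
--         return 0
--     return m - (m + 3) // 4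
-- ===== Notes on version B (the rewrite author's own statement) =====
-- stated objective: faster
-- what changed: Replaced the O(n) counting loop by an O(1) closed form: the product i(i+1)(i+2) is divisible by 4 exactly when i % 4 != 1, so the count over [1, n-2] is m - ceil(m/4) with m = n-2.
import Mathlib
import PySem

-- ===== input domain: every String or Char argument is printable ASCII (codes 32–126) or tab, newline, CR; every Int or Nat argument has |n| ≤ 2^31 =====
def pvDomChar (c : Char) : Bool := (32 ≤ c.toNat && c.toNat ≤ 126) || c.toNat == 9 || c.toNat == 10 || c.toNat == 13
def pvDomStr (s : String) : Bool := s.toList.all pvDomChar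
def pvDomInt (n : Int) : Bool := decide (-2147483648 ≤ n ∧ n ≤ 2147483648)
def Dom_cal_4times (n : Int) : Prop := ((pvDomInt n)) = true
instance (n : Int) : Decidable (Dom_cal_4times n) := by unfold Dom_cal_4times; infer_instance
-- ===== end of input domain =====

-- B replaces A's O(n) loop with an O(1) closed-form count by residue mod 4 (objective: faster).

-- ===== PORT A =====
def cal_4times (n : Int) : Int :=
  (PySem.List.pyRange 1 (n - 1) 1).foldl
    (fun c i =>
      let k := i * (i + 1) * (i + 2)
      if PySem.Int.mod k 4 = 0 then c + 1 else c) 0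

-- ===== PORT B =====
def cal_4times_alt (n : Int) : Int :=
  let m := n - 2
  if m ≤ 0 then 0 else m - PySem.Int.floordiv (m + 3) 4

-- ===== PRECONDITION & SPEC =====
def Spec_cal_4times (n : Int) (out : Int) : Prop := out = cal_4times_alt n
instance (n : Int) (out : Int) : Decidable (Spec_cal_4times n out) := by unfold Spec_cal_4times; infer_instance

-- ===== CLAIM (what is proved, stated in full; the proofs are below) =====
def Claim_equal_cal_4times : Prop := ∀ (n : Int), Dom_cal_4times n → Spec_cal_4times n (cal_4times n)

-- ===== LEMMAS AND PROOFS =====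

-- i(i+1)(i+2) % 4 = 0 exactly when i % 4 ≠ 1
theorem pv_prod_mod4 (i : Int) : (i * (i + 1) * (i + 2)) % 4 = 0 ↔ ¬ (i % 4 = 1) := by
  have hm : i % 4 ≡ i [ZMOD 4] := Int.emod_emod_of_dvd i dvd_rfl
  have hp : (i % 4) * (i % 4 + 1) * (i % 4 + 2) ≡ i * (i + 1) * (i + 2) [ZMOD 4] :=
    (hm.mul (hm.add_right 1)).mul (hm.add_right 2)
  have hr : i % 4 = 0 ∨ i % 4 = 1 ∨ i % 4 = 2 ∨ i % 4 = 3 := by omega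
  have hp' : (i * (i + 1) * (i + 2)) % 4 = ((i % 4) * (i % 4 + 1) * (i % 4 + 2)) % 4 := hp.symm
  rcases hr with h | h | h | h <;> rw [hp', h] <;> norm_num

-- the loop over range(1, m+1) equals the closed form
theorem pv_loop_closed (k : Nat) :
    (PySem.List.pyRange 1 ((k : Int) + 1) 1).foldl
      (fun c i =>
        let x := i * (i + 1) * (i + 2)
        if PySem.Int.mod x 4 = 0 then c + 1 else c) 0
      = (k : Int) - ((k : Int) + 3) / 4 := by
  induction k with
  | zero =>
    rw [PySem.List.pyRange_one_eq_nil (a := 1) (b := ((0:Nat):Int) + 1) (by norm_num)]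
    norm_num
  | succ k ih =>
    have hsplit : PySem.List.pyRange 1 (((k:Int) + 1) + 1) 1
        = PySem.List.pyRange 1 ((k : Int) + 1) 1 ++ [(k : Int) + 1] :=
      PySem.List.pyRange_one_succ_right (a := 1) (b := (k:Int) + 1) (by omega)
    push_cast
    rw [hsplit, List.foldl_append, ih]
    simp only [List.foldl]
    have hmod : PySem.Int.mod (((k:Int)+1) * ((k:Int)+1+1) * ((k:Int)+1+2)) 4
        = (((k:Int)+1) * ((k:Int)+1+1) * ((k:Int)+1+2)) % 4 :=
      PySem.Int.mod_eq_emod_of_pos (by omega)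
    rw [hmod]
    by_cases h : (((k:Int)+1) * ((k:Int)+1+1) * ((k:Int)+1+2)) % 4 = 0
    · rw [if_pos h]
      have h1 : ¬ (((k:Int)+1) % 4 = 1) := (pv_prod_mod4 _).mp h
      omega
    · rw [if_neg h]
      have h1 : ((k:Int)+1) % 4 = 1 := by
        by_contra hc; exact h ((pv_prod_mod4 _).mpr hc)
      omega

-- ===== VERDICT (by name: the statement is the Claim_ definition above) =====
theorem cal_4times_spec : Claim_equal_cal_4times := by
  intro n _
  unfold Spec_cal_4times cal_4times cal_4times_alt
  by_cases h : n - 2 ≤ 0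
  · rw [if_pos h]
    rw [PySem.List.pyRange_one_eq_nil (a := 1) (b := n - 1) (by omega)]
    simp
  · rw [if_neg h]
    obtain ⟨k, hkeq⟩ : ∃ k : Nat, n - 2 = (k : Int) + 1 := ⟨(n - 3).toNat, by omega⟩
    rw [PySem.Int.floordiv_eq_ediv_of_pos (by omega)]
    have hc := pv_loop_closed (k + 1)
    push_cast at hc
    rw [show n - 1 = ((k:Int) + 1) + 1 by omega, show n - 2 = (k:Int) + 1 from hkeq]
    exact hc
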